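-- pv_equiv track=rewrite | github.com/FaberDS/aoc-2024-python | exercises/day_04.py | count_diagonal_tl_br
-- ===== SOURCE A (Python) =====
-- def count_diagonal_tl_br(a,kw):
--     n = len(kw)
--     count = 0
--     rows = len(a)
--     cols = len(a[0])
--
--     # Traverse diagonals starting from each row of the first column
--     for start_row in range(rows):
--         word = ""
--         for k in range(min(rows - start_row, cols)):
--             word += a[start_row + k][k]
--             if len(word) == n:
--                 if word == kw:
--                     count += 1
--                 word = word[1:]  # Slide window
--
--     # Traverse diagonals starting from each column of the first row (except the first element)
--     for start_col in range(1, cols):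
--         word = ""
--         for k in range(min(rows, cols - start_col)):
--             word += a[k][start_col + k]
--             if len(word) == n:
--                 if word == kw:
--                     count += 1
--                 word = word[1:]  # Slide window
--     return count
-- ===== SOURCE B (Python) =====
-- def count_diagonal_tl_br(a, kw):
--     n = len(kw)
--     rows = len(a)
--     cols = len(a[0])
--     total = 0
--     # one loop over diagonal offsets d = col - row
--     for d in range(1 - rows, cols):
--         r0, c0 = (-d, 0) if d < 0 else (0, d)
--         s = ''.join(a[r0 + k][c0 + k] for k in range(min(rows - r0, cols - c0)))
--         total += sum(1 for i in range(len(s) - n + 1) if s.startswith(kw, i))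
--     return total
-- ===== Notes on version B (the rewrite author's own statement) =====
-- stated objective: alternative
-- what changed: B replaces A's two outer loops with one loop over diagonal offsets d = col - row, builds each diagonal string once with join, and counts matches positionally with startswith instead of maintaining A's incremental sliding-window string.
-- outside the precondition, e.g. on count_diagonal_tl_br(['ab', 'cd'], ''): A returns 0, B returns 7
import Mathlib
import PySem

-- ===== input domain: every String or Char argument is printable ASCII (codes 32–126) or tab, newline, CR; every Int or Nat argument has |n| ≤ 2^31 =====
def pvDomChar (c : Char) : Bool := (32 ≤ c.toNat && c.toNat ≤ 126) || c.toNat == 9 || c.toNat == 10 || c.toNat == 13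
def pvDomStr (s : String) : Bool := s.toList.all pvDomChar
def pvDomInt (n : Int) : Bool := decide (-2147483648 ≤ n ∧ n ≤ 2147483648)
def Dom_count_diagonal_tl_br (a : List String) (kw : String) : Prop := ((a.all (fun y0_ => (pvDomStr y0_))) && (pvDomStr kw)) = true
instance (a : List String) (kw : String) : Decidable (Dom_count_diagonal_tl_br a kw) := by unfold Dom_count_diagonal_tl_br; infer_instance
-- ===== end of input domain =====

-- B builds each TL-BR diagonal string once (one loop over offsets d = col - row) and counts
-- keyword matches positionally, instead of A's two loops with an incremental sliding window.

-- ===== PORT A =====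
-- a[r][c] for the nonnegative indices A uses; exact wherever Python does not raise
-- (inside Pre_ every access is in range; the ' ' default is only reached outside Pre_).
def pvCellA (a : List String) (r c : Nat) : Char := (((a[r]?).getD "").toList[c]?).getD ' '

-- one step of A's inner loop: word += ch; if len(word)==n: (count) ; word = word[1:]
def pvStepA (kwl : List Char) (st : List Char × Int) (x : Char) : List Char × Int :=
  let word := st.1 ++ [x]
  if word.length = kwl.length then (word.drop 1, st.2 + if word = kwl then 1 else 0)
  else (word, st.2)

def count_diagonal_tl_br (a : List String) (kw : String) : Int :=
  let kwl := kw.toList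
  let rows := a.length
  let cols := ((a[0]?).getD "").length
  let count1 := (List.range rows).foldl (fun count start_row =>
    ((List.range (min (rows - start_row) cols)).foldl
      (fun st k => pvStepA kwl st (pvCellA a (start_row + k) k)) ([], count)).2) 0
  (List.range' 1 (cols - 1)).foldl (fun count start_col =>
    ((List.range (min rows (cols - start_col))).foldl
      (fun st k => pvStepA kwl st (pvCellA a k (start_col + k))) ([], count)).2) count1

-- ===== PORT B =====
-- a[r][c]; exact wherever Python does not raise (as for pvCellA)
def pvCellB (a : List String) (r c : Int) : Char :=
  (PySem.List.pyGet? ((PySem.List.pyGet? a r).getD "").toList c).getD ' '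

def count_diagonal_tl_br_alt (a : List String) (kw : String) : Int :=
  let kwl := kw.toList
  let rows := a.length
  let cols := ((a[0]?).getD "").length
  (PySem.List.pyRange (1 - (rows : Int)) (cols : Int) 1).foldl (fun total d =>
    let r0 : Int := if d < 0 then -d else 0
    let c0 : Int := if d < 0 then 0 else d
    let L : Nat := (min ((rows : Int) - r0) ((cols : Int) - c0)).toNat
    let s : List Char := (List.range L).map (fun (k : Nat) => pvCellB a (r0 + k) (c0 + k))
    total + ((List.range (s.length + 1 - kwl.length)).countP
               (fun i => kwl.isPrefixOf (s.drop i)) : Int)) 0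

-- ===== PRECONDITION & SPEC =====
-- A raises IndexError when a is empty or some row is shorter than len(a[0]); those inputs are
-- excluded. Pre_ also excludes kw = "", on which A returns 0 while counting empty matches is a
-- corner nobody specifies (B counts one per window position); both values are defensible.
def Pre_count_diagonal_tl_br (a : List String) (kw : String) : Prop :=
  a ≠ [] ∧ kw ≠ "" ∧ ∀ s ∈ a, (a.headD "").length ≤ s.length
instance (a : List String) (kw : String) : Decidable (Pre_count_diagonal_tl_br a kw) := by
  unfold Pre_count_diagonal_tl_br; infer_instance
def pvWitness_count_diagonal_tl_br : List String × String := (["XMAS", "MMXA", "AAMX", "SSSX"], "XMAS")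
def Spec_count_diagonal_tl_br (a : List String) (kw : String) (out : Int) : Prop := out = count_diagonal_tl_br_alt a kw
instance (a : List String) (kw : String) (out : Int) : Decidable (Spec_count_diagonal_tl_br a kw out) := by unfold Spec_count_diagonal_tl_br; infer_instance

-- ===== CLAIM (what is proved, stated in full; the proofs are below) =====
def Claim_equal_count_diagonal_tl_br : Prop := ∀ (a : List String) (kw : String), Dom_count_diagonal_tl_br a kw → Pre_count_diagonal_tl_br a kw → Spec_count_diagonal_tl_br a kw (count_diagonal_tl_br a kw)

-- ===== LEMMAS AND PROOFS =====

-- number of (overlapping) occurrences of kwl in a char list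
def pvOcc (kwl : List Char) : List Char → Nat
  | [] => 0
  | y :: t => (if kwl.isPrefixOf (y :: t) then 1 else 0) + pvOcc kwl t

-- the TL-BR diagonal starting at (r0, c0) of length L
def pvDiag (a : List String) (r0 c0 : Int) (L : Nat) : List Char :=
  (List.range L).map (fun (k : Nat) => pvCellB a (r0 + k) (c0 + k))

-- occurrence count on the diagonal with offset d = col - row
def pvDiagCnt (a : List String) (kwl : List Char) (rows cols : Nat) (d : Int) : Int :=
  let r0 : Int := if d < 0 then -d else 0
  let c0 : Int := if d < 0 then 0 else d
  (pvOcc kwl (pvDiag a r0 c0 ((min ((rows : Int) - r0) ((cols : Int) - c0)).toNat)) : Int)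

theorem pvCellA_eq (a : List String) (r c : Nat) :
    pvCellA a r c = pvCellB a (r : Int) (c : Int) := by
  simp [pvCellA, pvCellB, PySem.List.pyGet?_natCast]

theorem pvOcc_short (kwl : List Char) : ∀ l : List Char, l.length < kwl.length → pvOcc kwl l = 0 := by
  intro l
  induction l with
  | nil => intro _; rfl
  | cons y t ih =>
    intro h
    have hnp : ¬ kwl.isPrefixOf (y :: t) = true := by
      intro hp
      have := (List.isPrefixOf_iff_prefix.mp hp).length_le
      simp at this h; omega
    simp only [pvOcc, hnp, if_neg]
    simp only [List.length_cons] at h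
    have := ih (by omega)
    simpa using this

theorem pvOcc_cons_full (kwl v cs : List Char) (hv : v.length = kwl.length) (h1 : kwl ≠ []) :
    pvOcc kwl (v ++ cs) = (if v = kwl then 1 else 0) + pvOcc kwl (v.drop 1 ++ cs) := by
  obtain ⟨y, t, rfl⟩ : ∃ y t, v = y :: t := by
    cases v with
    | nil =>
      exfalso; apply h1
      have : kwl.length = 0 := by simpa using hv.symm
      simpa using List.length_eq_zero_iff.mp this
    | cons y t => exact ⟨y, t, rfl⟩
  have hcond : (kwl.isPrefixOf ((y :: t) ++ cs) = true) ↔ (y :: t) = kwl := by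
    rw [List.isPrefixOf_iff_prefix, List.prefix_iff_eq_take]
    constructor
    · intro h
      have : ((y :: t) ++ cs).take kwl.length = y :: t := by
        rw [← hv, List.take_left]
      rw [this] at h; exact h.symm
    · rintro rfl; rw [← hv, List.take_left]
  simp only [List.cons_append, pvOcc, List.drop_one, List.tail_cons]
  have hc2 : (kwl.isPrefixOf (y :: (t ++ cs)) = true) ↔ (y :: t) = kwl := by
    simpa using hcond
  congr 1
  by_cases h : (y :: t) = kwl
  · simp [h, hc2.mpr h]
  · simp only [h, if_false]
    rw [if_neg]
    intro hc
    exact h (hc2.mp hc)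

-- A's sliding window counts exactly the occurrences
theorem pvWindow (kwl : List Char) (hk : kwl ≠ []) :
    ∀ (cs w : List Char) (c : Int), w.length + 1 ≤ kwl.length →
      (cs.foldl (pvStepA kwl) (w, c)).2 = c + (pvOcc kwl (w ++ cs) : Int) := by
  intro cs
  induction cs with
  | nil =>
    intro w c hw
    have : pvOcc kwl w = 0 := pvOcc_short kwl w (by omega)
    simp [this]
  | cons x cs ih =>
    intro w c hw
    rw [List.foldl_cons]
    by_cases h : (w ++ [x]).length = kwl.length
    · have hstep : pvStepA kwl (w, c) x
          = ((w ++ [x]).drop 1, c + if (w ++ [x]) = kwl then 1 else 0) := by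
        simp only [pvStepA]
        rw [if_pos h]
      rw [hstep, ih _ _ (by simp at h ⊢; omega)]
      have := pvOcc_cons_full kwl (w ++ [x]) cs h hk
      have hassoc : w ++ x :: cs = (w ++ [x]) ++ cs := by simp
      rw [hassoc, this]
      push_cast
      ring
    · have hstep : pvStepA kwl (w, c) x = (w ++ [x], c) := by
        simp only [pvStepA]
        rw [if_neg h]
      rw [hstep, ih _ _ (by simp at h hw ⊢; omega)]
      have hassoc : (w ++ [x]) ++ cs = w ++ x :: cs := by simp
      rw [hassoc]

-- B's positional count counts exactly the occurrences
theorem pvCount (kwl : List Char) (hk : kwl ≠ []) :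
    ∀ l : List Char,
      (List.range (l.length + 1 - kwl.length)).countP (fun i => kwl.isPrefixOf (l.drop i)) = pvOcc kwl l := by
  have hk1 : 1 ≤ kwl.length := by cases kwl with | nil => simp at hk | cons a b => simp
  intro l
  induction l with
  | nil =>
    have : (0 : Nat) + 1 - kwl.length = 0 := by omega
    simp [this, pvOcc]
  | cons y t ih =>
    by_cases h : kwl.length ≤ t.length + 1
    · have hlen : (y :: t).length + 1 - kwl.length = (t.length + 1 - kwl.length) + 1 := by
        simp; omega
      rw [hlen, List.range_succ_eq_map, List.countP_cons, List.countP_map]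
      have : ((List.range (t.length + 1 - kwl.length)).countP
          ((fun i => kwl.isPrefixOf ((y :: t).drop i)) ∘ Nat.succ)) = pvOcc kwl t := by
        rw [← ih]
        apply List.countP_congr
        intro i _
        simp
      rw [this]
      simp [pvOcc]
      omega
    · have hlen : (y :: t).length + 1 - kwl.length = 0 := by simp; omega
      rw [hlen]
      have h2 : pvOcc kwl t = 0 := pvOcc_short kwl t (by omega)
      have h3 : ¬ kwl.isPrefixOf (y :: t) = true := by
        intro hp
        have := (List.isPrefixOf_iff_prefix.mp hp).length_le
        simp at this; omega
      simp [pvOcc, h3, h2]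

-- sum over List.range is invariant under reflection
theorem pvSumReflect (f : Nat → Int) : ∀ m : Nat,
    ((List.range m).map (fun k => f (m - 1 - k))).sum = ((List.range m).map f).sum := by
  intro m
  induction m generalizing f with
  | zero => rfl
  | succ m ih =>
    have hL : ((List.range (m+1)).map (fun k => f (m + 1 - 1 - k))).sum
        = f m + ((List.range m).map (fun k => f (m - 1 - k))).sum := by
      rw [List.range_succ_eq_map]
      rw [List.map_cons, List.map_map, List.sum_cons]
      have e0 : m + 1 - 1 - 0 = m := by omega
      have e1 : ((fun k => f (m + 1 - 1 - k)) ∘ Nat.succ) = (fun k => f (m - 1 - k)) := by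
        funext k
        simp only [Function.comp_apply]
        congr 1
        omega
      rw [e0, e1]
    have hR : ((List.range (m+1)).map f).sum = ((List.range m).map f).sum + f m := by
      rw [List.range_succ]
      simp
    rw [hL, hR, ih f]
    ring



theorem pvDiagCnt_nonneg (a : List String) (kwl : List Char) (rows cols : Nat) (d : Nat) (hd : d ≤ cols) :
    pvDiagCnt a kwl rows cols (d : Int)
      = (pvOcc kwl (pvDiag a 0 (d : Int) (min rows (cols - d))) : Int) := by
  have hnd : ¬ (d : Int) < 0 := by omega
  simp only [pvDiagCnt, if_neg hnd]
  have hL : (min ((rows : Int) - 0) ((cols : Int) - (d : Int))).toNat = min rows (cols - d) := by omega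
  rw [hL]

theorem pvDiagCnt_neg (a : List String) (kwl : List Char) (rows cols : Nat) (r : Nat)
    (h1 : 1 ≤ r) (h2 : r ≤ rows) :
    pvDiagCnt a kwl rows cols (-(r : Int))
      = (pvOcc kwl (pvDiag a (r : Int) 0 (min (rows - r) cols)) : Int) := by
  have hnd : -(r : Int) < 0 := by omega
  simp only [pvDiagCnt, if_pos hnd]
  have hL : (min ((rows : Int) - -(-(r : Int))) ((cols : Int) - 0)).toNat = min (rows - r) cols := by omega
  rw [hL]
  have hr : -(-(r : Int)) = (r : Int) := by omega
  rw [hr]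

-- the index bookkeeping: the two loops of A and B's one offset loop sum the same diagonal counts
theorem pvAssemble (a : List String) (kwl : List Char) (rows cols : Nat) :
    ((List.range rows).map (fun (sr : Nat) => (pvOcc kwl (pvDiag a (sr : Int) 0 (min (rows - sr) cols)) : Int))).sum
      + ((List.range' 1 (cols - 1)).map (fun (sc : Nat) => (pvOcc kwl (pvDiag a 0 (sc : Int) (min rows (cols - sc))) : Int))).sum
    = ((PySem.List.pyRange (1 - (rows : Int)) (cols : Int) 1).map (pvDiagCnt a kwl rows cols)).sum := by
  by_cases hc : cols = 0
  · subst hc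
    have hz1 : ((List.range rows).map (fun (sr : Nat) => (pvOcc kwl (pvDiag a (sr : Int) 0 (min (rows - sr) 0)) : Int))).sum = 0 := by
      apply List.sum_eq_zero
      intro x hx
      obtain ⟨sr, _, rfl⟩ := List.mem_map.mp hx
      simp [pvDiag, pvOcc]
    have hz2 : ((PySem.List.pyRange (1 - (rows : Int)) ((0 : Nat) : Int) 1).map (pvDiagCnt a kwl rows 0)).sum = 0 := by
      apply List.sum_eq_zero
      intro x hx
      obtain ⟨d, hd, rfl⟩ := List.mem_map.mp hx
      have hd' := (PySem.List.mem_pyRange_one).mp hd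
      have hdn : d < 0 := by omega
      simp only [pvDiagCnt, if_pos hdn]
      have hL : (min ((rows : Int) - -d) (((0 : Nat) : Int) - 0)).toNat = 0 := by omega
      rw [hL]
      simp [pvDiag, pvOcc]
    rw [hz1, hz2]
    simp
  by_cases hr : rows = 0
  · subst hr
    have hz1 : ((List.range' 1 (cols - 1)).map (fun (sc : Nat) => (pvOcc kwl (pvDiag a 0 (sc : Int) (min 0 (cols - sc))) : Int))).sum = 0 := by
      apply List.sum_eq_zero
      intro x hx
      obtain ⟨sc, _, rfl⟩ := List.mem_map.mp hx
      simp [pvDiag, pvOcc]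
    have hz2 : ((PySem.List.pyRange (1 - ((0 : Nat) : Int)) ((cols : Nat) : Int) 1).map (pvDiagCnt a kwl 0 cols)).sum = 0 := by
      apply List.sum_eq_zero
      intro x hx
      obtain ⟨d, hd, rfl⟩ := List.mem_map.mp hx
      have hd' := (PySem.List.mem_pyRange_one).mp hd
      have hdn : ¬ d < 0 := by omega
      simp only [pvDiagCnt, if_neg hdn]
      have hL : (min (((0 : Nat) : Int) - 0) ((cols : Int) - d)).toNat = 0 := by omega
      rw [hL]
      simp [pvDiag, pvOcc]
    rw [hz1, hz2]
    simp
  obtain ⟨m, rfl⟩ : ∃ m, rows = m + 1 := ⟨rows - 1, by omega⟩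
  -- split B's offset range at 0 and peel the d = 0 diagonal
  rw [PySem.List.pyRange_one_append (1 - ((m + 1 : Nat) : Int)) 0 (cols : Int) (by push_cast; omega)
        (by push_cast; omega),
      List.map_append, List.sum_append,
      PySem.List.pyRange_one_cons (by push_cast; omega : (0 : Int) < (cols : Int)),
      List.map_cons, List.sum_cons]
  have h01 : (0 : Int) + 1 = 1 := by norm_num
  rw [h01]
  have eneg : ((PySem.List.pyRange (1 - ((m + 1 : Nat) : Int)) 0 1).map (pvDiagCnt a kwl (m + 1) cols)).sum
      = ((List.range m).map (fun (k : Nat) =>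
          (pvOcc kwl (pvDiag a ((k + 1 : Nat) : Int) 0 (min (m + 1 - (k + 1)) cols)) : Int))).sum := by
    rw [PySem.List.pyRange_one]
    have h1 : ((0 : Int) - (1 - ((m + 1 : Nat) : Int))).toNat = m := by omega
    rw [h1, List.map_map]
    rw [← pvSumReflect (fun (k : Nat) =>
          (pvOcc kwl (pvDiag a ((k + 1 : Nat) : Int) 0 (min (m + 1 - (k + 1)) cols)) : Int)) m]
    apply congrArg List.sum
    apply List.map_congr_left
    intro k hk
    simp only [List.mem_range] at hk
    simp only [Function.comp_apply]
    have hd : (1 - ((m + 1 : Nat) : Int)) + (k : Int) = -(((m - k : Nat)) : Int) := by omega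
    rw [hd, pvDiagCnt_neg a kwl (m + 1) cols (m - k) (by omega) (by omega)]
    have h2 : m - k = (m - 1 - k) + 1 := by omega
    rw [h2]
  have e0 : pvDiagCnt a kwl (m + 1) cols 0
      = (pvOcc kwl (pvDiag a (((0 : Nat)) : Int) 0 (min (m + 1 - 0) cols)) : Int) := by
    have h := pvDiagCnt_nonneg a kwl (m + 1) cols 0 (by omega)
    simpa using h
  have epos : ((PySem.List.pyRange 1 (cols : Int) 1).map (pvDiagCnt a kwl (m + 1) cols)).sum
      = ((List.range' 1 (cols - 1)).map (fun (sc : Nat) =>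
          (pvOcc kwl (pvDiag a 0 (sc : Int) (min (m + 1) (cols - sc))) : Int))).sum := by
    rw [PySem.List.pyRange_one]
    have h1 : ((cols : Int) - 1).toNat = cols - 1 := by omega
    rw [h1, List.map_map, List.range'_eq_map_range, List.map_map]
    apply congrArg List.sum
    apply List.map_congr_left
    intro k hk
    simp only [List.mem_range] at hk
    simp only [Function.comp_apply]
    have hd : (1 : Int) + (k : Int) = (((1 + k : Nat)) : Int) := by omega
    rw [hd, pvDiagCnt_nonneg a kwl (m + 1) cols (1 + k) (by omega)]
  have eL1 : ((List.range (m + 1)).map (fun (sr : Nat) =>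
        (pvOcc kwl (pvDiag a (sr : Int) 0 (min (m + 1 - sr) cols)) : Int))).sum
      = (pvOcc kwl (pvDiag a (((0 : Nat)) : Int) 0 (min (m + 1 - 0) cols)) : Int)
        + ((List.range m).map (fun (k : Nat) =>
            (pvOcc kwl (pvDiag a ((k + 1 : Nat) : Int) 0 (min (m + 1 - (k + 1)) cols)) : Int))).sum := by
    rw [List.range_succ_eq_map, List.map_cons, List.sum_cons, List.map_map]
    congr 1
  rw [eneg, e0, epos, eL1]
  ring

-- A's loops, per diagonal, via the window invariant
theorem pvInner1 (a : List String) (kwl : List Char) (hk : kwl ≠ []) (rows cols : Nat)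
    (c : Int) (sr : Nat) :
    ((List.range (min (rows - sr) cols)).foldl
        (fun st k => pvStepA kwl st (pvCellA a (sr + k) k)) ([], c)).2
      = c + (pvOcc kwl (pvDiag a (sr : Int) 0 (min (rows - sr) cols)) : Int) := by
  have hm : List.foldl (fun st k => pvStepA kwl st (pvCellA a (sr + k) k)) ([], c)
        (List.range (min (rows - sr) cols))
      = List.foldl (pvStepA kwl) ([], c)
        ((List.range (min (rows - sr) cols)).map (fun k => pvCellA a (sr + k) k)) :=
    List.foldl_map.symm
  rw [hm]
  rw [pvWindow kwl hk _ [] c (by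
    have : 0 < kwl.length := List.length_pos_iff.mpr hk
    simpa using this)]
  congr 2
  simp only [List.nil_append, pvDiag]
  apply congrArg (pvOcc kwl)
  apply List.map_congr_left
  intro k _
  rw [pvCellA_eq]
  congr 1 <;> push_cast <;> ring

theorem pvInner2 (a : List String) (kwl : List Char) (hk : kwl ≠ []) (rows cols : Nat)
    (c : Int) (sc : Nat) :
    ((List.range (min rows (cols - sc))).foldl
        (fun st k => pvStepA kwl st (pvCellA a k (sc + k))) ([], c)).2
      = c + (pvOcc kwl (pvDiag a 0 (sc : Int) (min rows (cols - sc))) : Int) := by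
  have hm : List.foldl (fun st k => pvStepA kwl st (pvCellA a k (sc + k))) ([], c)
        (List.range (min rows (cols - sc)))
      = List.foldl (pvStepA kwl) ([], c)
        ((List.range (min rows (cols - sc))).map (fun k => pvCellA a k (sc + k))) :=
    List.foldl_map.symm
  rw [hm]
  rw [pvWindow kwl hk _ [] c (by
    have : 0 < kwl.length := List.length_pos_iff.mpr hk
    simpa using this)]
  congr 2
  simp only [List.nil_append, pvDiag]
  apply congrArg (pvOcc kwl)
  apply List.map_congr_left
  intro k _
  rw [pvCellA_eq]
  congr 1 <;> push_cast <;> ring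

theorem pvMain (a : List String) (kw : String) (hk : kw.toList ≠ []) :
    count_diagonal_tl_br a kw = count_diagonal_tl_br_alt a kw := by
  have hB : count_diagonal_tl_br_alt a kw
      = ((PySem.List.pyRange (1 - (a.length : Int)) ((((a[0]?).getD "").length : Nat) : Int) 1).map
          (pvDiagCnt a kw.toList a.length ((a[0]?).getD "").length)).sum := by
    simp only [count_diagonal_tl_br_alt]
    rw [PySem.List.foldl_add, zero_add]
    apply congrArg List.sum
    apply List.map_congr_left
    intro d _
    simp only [pvDiagCnt, pvDiag]
    rw [pvCount kw.toList hk]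
  have hA : count_diagonal_tl_br a kw
      = ((List.range a.length).map (fun (sr : Nat) =>
            (pvOcc kw.toList (pvDiag a (sr : Int) 0 (min (a.length - sr) ((a[0]?).getD "").length)) : Int))).sum
        + ((List.range' 1 (((a[0]?).getD "").length - 1)).map (fun (sc : Nat) =>
            (pvOcc kw.toList (pvDiag a 0 (sc : Int) (min a.length (((a[0]?).getD "").length - sc))) : Int))).sum := by
    simp only [count_diagonal_tl_br]
    have e1 : (fun (count : Int) (start_row : Nat) =>
          ((List.range (min (a.length - start_row) ((a[0]?).getD "").length)).foldl
            (fun st k => pvStepA kw.toList st (pvCellA a (start_row + k) k)) ([], count)).2)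
        = fun (count : Int) (start_row : Nat) => count +
            (pvOcc kw.toList (pvDiag a (start_row : Int) 0 (min (a.length - start_row) ((a[0]?).getD "").length)) : Int) := by
      funext c sr
      exact pvInner1 a kw.toList hk a.length ((a[0]?).getD "").length c sr
    have e2 : (fun (count : Int) (start_col : Nat) =>
          ((List.range (min a.length (((a[0]?).getD "").length - start_col))).foldl
            (fun st k => pvStepA kw.toList st (pvCellA a k (start_col + k))) ([], count)).2)
        = fun (count : Int) (start_col : Nat) => count +
            (pvOcc kw.toList (pvDiag a 0 (start_col : Int) (min a.length (((a[0]?).getD "").length - start_col))) : Int) := by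
      funext c sc
      exact pvInner2 a kw.toList hk a.length ((a[0]?).getD "").length c sc
    rw [e1, e2, PySem.List.foldl_add, PySem.List.foldl_add, zero_add]
  rw [hA, hB, pvAssemble]

-- ===== VERDICT (by name: the statement is the Claim_ definition above) =====
theorem count_diagonal_tl_br_spec : Claim_equal_count_diagonal_tl_br := by
  intro a kw _ hpre
  unfold Spec_count_diagonal_tl_br
  exact pvMain a kw (by simpa [String.toList_eq_nil_iff] using hpre.2.1)
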